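-- pv_equiv track=rewrite | github.com/josepanguera/advent-of-code | 2022/day12/problem1.py | discard_solved_or_repeated
-- ===== SOURCE A (Python) =====
-- def discard_solved_or_repeated(next_candidates, solved):
--     candidates = {}
--     for candidate in next_candidates:
--         position, steps = candidate
--         if position in solved:
--             pass
--         elif position not in candidates:
--             candidates[position] = steps
--         elif steps < candidates[position]:
--             candidates[position] = steps
--     return [(k, v) for k, v in candidates.items()]
-- ===== SOURCE B (Python) =====
-- from collections import defaultdict
--
--
-- def discard_solved_or_repeated(next_candidates, solved):
--     grouped = defaultdict(list)
--     for position, steps in next_candidates: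
--         if position not in solved:
--             grouped[position].append(steps)
--     return [(position, min(step_list)) for position, step_list in grouped.items()]
-- ===== Notes on version B (the rewrite author's own statement) =====
-- stated objective: alternative
-- what changed: Two-phase rewrite: first group all step values per unsolved position into lists (defaultdict(list), insertion order), then reduce each list with min in a comprehension, instead of maintaining a single running minimum with three branches inside the loop.
import Mathlib
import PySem

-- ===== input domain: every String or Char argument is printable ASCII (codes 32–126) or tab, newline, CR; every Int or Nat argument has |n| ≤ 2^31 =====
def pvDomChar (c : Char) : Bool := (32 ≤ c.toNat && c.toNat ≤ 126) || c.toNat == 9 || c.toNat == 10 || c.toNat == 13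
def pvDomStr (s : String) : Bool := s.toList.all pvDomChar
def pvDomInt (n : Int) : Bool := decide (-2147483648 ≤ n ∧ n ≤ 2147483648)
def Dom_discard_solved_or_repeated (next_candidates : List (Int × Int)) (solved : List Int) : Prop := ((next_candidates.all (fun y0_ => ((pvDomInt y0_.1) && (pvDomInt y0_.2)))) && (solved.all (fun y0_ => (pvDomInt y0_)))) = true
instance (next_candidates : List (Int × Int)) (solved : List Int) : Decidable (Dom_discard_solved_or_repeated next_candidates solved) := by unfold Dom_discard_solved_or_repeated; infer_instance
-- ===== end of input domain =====

-- B keeps A's running-min loop apart into two phases: group all step values per unsolved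
-- position into lists, then take min of each list (alternative decomposition, same cost).

-- ===== PORT A =====
-- loop body of A's for-loop (the three-way branch); 'candidates[position]' is only read
-- when 'position in candidates', so getD with a dummy default 0 is exact there
def dsrInner (candidates : PySem.Dict Int Int) (candidate : Int × Int) : PySem.Dict Int Int :=
  if !(candidates.contains candidate.1) then candidates.insert candidate.1 candidate.2
  else if candidate.2 < candidates.getD candidate.1 0 then candidates.insert candidate.1 candidate.2
  else candidates

def dsrStepA (solved : List Int) (candidates : PySem.Dict Int Int) (candidate : Int × Int) : PySem.Dict Int Int :=
  if solved.contains candidate.1 then candidates else dsrInner candidates candidate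

def discard_solved_or_repeated (next_candidates : List (Int × Int)) (solved : List Int) : List (Int × Int) :=
  (next_candidates.foldl (dsrStepA solved) PySem.Dict.empty).items

-- ===== PORT B =====
-- min(step_list) on the (always nonempty) per-position list
def dsrPyMin (l : List Int) : Int :=
  match l with
  | [] => 0
  | x :: xs => xs.foldl min x

def dsrStepB (solved : List Int) (grouped : PySem.Dict Int (List Int)) (p : Int × Int) : PySem.Dict Int (List Int) :=
  if solved.contains p.1 then grouped else grouped.modify p.1 [] (· ++ [p.2])

def discard_solved_or_repeated_alt (next_candidates : List (Int × Int)) (solved : List Int) : List (Int × Int) :=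
  ((next_candidates.foldl (dsrStepB solved) PySem.Dict.empty).items).map (fun p => (p.1, dsrPyMin p.2))

-- ===== PRECONDITION & SPEC =====
def Spec_discard_solved_or_repeated (next_candidates : List (Int × Int)) (solved : List Int) (out : List (Int × Int)) : Prop := out = discard_solved_or_repeated_alt next_candidates solved
instance (next_candidates : List (Int × Int)) (solved : List Int) (out : List (Int × Int)) : Decidable (Spec_discard_solved_or_repeated next_candidates solved out) := by unfold Spec_discard_solved_or_repeated; infer_instance

-- ===== CLAIM (what is proved, stated in full; the proofs are below) =====
def Claim_equal_discard_solved_or_repeated : Prop := ∀ (next_candidates : List (Int × Int)) (solved : List Int), Dom_discard_solved_or_repeated next_candidates solved → Spec_discard_solved_or_repeated next_candidates solved (discard_solved_or_repeated next_candidates solved)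

-- ===== LEMMAS AND PROOFS =====

-- a fold whose body skips elements satisfying c is the fold over the filtered list
theorem dsr_foldl_skip {α β : Type} (c : β → Bool) (g : α → β → α) :
    ∀ (l : List β) (d : α),
      l.foldl (fun d p => if c p then d else g d p) d = (l.filter (fun p => !(c p))).foldl g d := by
  intro l
  induction l with
  | nil => intro d; rfl
  | cons p rest ih =>
    intro d
    by_cases h : c p = true <;> simp [List.filter, h, ih]

-- running minimum as an Option fold (A's loop effect on one key)
def dsrRun (o : Option Int) (l : List Int) : Option Int :=
  l.foldl (fun o s => some (match o with | none => s | some c => if s < c then s else c)) o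

theorem dsrRun_some (xs : List Int) : ∀ c : Int, dsrRun (some c) xs = some (xs.foldl min c) := by
  induction xs with
  | nil => intro c; rfl
  | cons s xs ih =>
    intro c
    have h : (if s < c then s else c) = min c s := by
      simp [min_def]; split_ifs <;> omega
    simp only [dsrRun, List.foldl] at *
    rw [ih, h]

theorem dsrRun_eq_pyMin (l : List Int) (h : l ≠ []) : dsrRun none l = some (dsrPyMin l) := by
  cases l with
  | nil => exact absurd rfl h
  | cons x xs => simpa [dsrRun, dsrPyMin, List.foldl] using dsrRun_some xs x

-- A's inner fold computes, on each key, the running min of the grouped steps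
theorem dsr_getA :
    ∀ (l : List (Int × Int)) (d : PySem.Dict Int Int) (k : Int),
      (l.foldl dsrInner d).get? k = dsrRun (d.get? k) ((l.filter (fun p => p.1 == k)).map (·.2)) := by
  intro l
  induction l with
  | nil => intro d k; rfl
  | cons p rest ih =>
    intro d k
    by_cases hk : p.1 = k
    · subst hk
      have hstep : (dsrInner d p).get? p.1 =
          some (match d.get? p.1 with | none => p.2 | some c => if p.2 < c then p.2 else c) := by
        cases hd : d.get? p.1 with
        | none =>
          have hc : d.contains p.1 = false := by
            rw [PySem.Dict.contains_eq_isSome_get?, hd]; rfl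
          simp [dsrInner, hc, PySem.Dict.get?_insert_self]
        | some c =>
          have hc : d.contains p.1 = true := by
            rw [PySem.Dict.contains_eq_isSome_get?, hd]; rfl
          have hgd : d.getD p.1 0 = c := PySem.Dict.getD_of_get?_eq_some _ 0 hd
          by_cases hlt : p.2 < c
          · simp [dsrInner, hc, hgd, hlt, PySem.Dict.get?_insert_self]
          · simp [dsrInner, hc, hgd, hlt, hd]
      simp only [List.foldl, List.filter]
      rw [ih, hstep]
      simp [dsrRun]
    · have hstep : (dsrInner d p).get? k = d.get? k := by
        have hne : k ≠ p.1 := fun h => hk h.symm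
        unfold dsrInner
        split_ifs <;> simp [PySem.Dict.get?_insert_of_ne _ _ hne]
      have hf : (p.1 == k) = false := by simp [hk]
      simp only [List.foldl, List.filter, hf]
      rw [ih, hstep]

-- A's inner fold visits keys in first-occurrence order
theorem dsr_keysA :
    ∀ (l : List (Int × Int)) (d : PySem.Dict Int Int),
      (l.foldl dsrInner d).keys = PySem.Set.update d.keys (l.map (·.1)) := by
  intro l
  induction l with
  | nil => intro d; simp [PySem.Set.update_nil]
  | cons p rest ih =>
    intro d
    have hstep : (dsrInner d p).keys = PySem.Set.add d.keys p.1 := by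
      by_cases hc : d.contains p.1 = true
      · have hm : p.1 ∈ d.keys := (PySem.Dict.contains_iff_mem_keys _ _).mp hc
        unfold dsrInner
        split_ifs with h1 h2
        · simp [hc] at h1
        · rw [PySem.Dict.keys_insert_of_contains _ _ hc]; simp [PySem.Set.add, PySem.Set.contains, hm]
        · simp [PySem.Set.add, PySem.Set.contains, hm]
      · have hc' : d.contains p.1 = false := by simpa using hc
        have hm : p.1 ∉ d.keys := fun h => hc ((PySem.Dict.contains_iff_mem_keys _ _).mpr h)
        simp [dsrInner, hc', PySem.Dict.keys_insert_of_not_contains _ _ hc', PySem.Set.add, PySem.Set.contains, hm]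
    simp only [List.foldl, List.map]
    rw [ih, hstep, PySem.Set.update_cons]

theorem dsr_nodupA :
    ∀ (l : List (Int × Int)) (d : PySem.Dict Int Int), d.keys.Nodup → (l.foldl dsrInner d).keys.Nodup := by
  intro l
  induction l with
  | nil => intro d h; exact h
  | cons p rest ih =>
    intro d h
    refine ih _ ?_
    unfold dsrInner
    split_ifs <;> first | exact PySem.Dict.nodup_keys_insert _ _ _ h | exact h

-- ===== VERDICT (by name: the statement is the Claim_ definition above) =====
theorem discard_solved_or_repeated_spec : Claim_equal_discard_solved_or_repeated := by
  intro next_candidates solved _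
  unfold Spec_discard_solved_or_repeated
  unfold discard_solved_or_repeated discard_solved_or_repeated_alt
  -- both loops skip solved positions: reduce to folds over the kept candidates
  have hA : next_candidates.foldl (dsrStepA solved) PySem.Dict.empty
      = (next_candidates.filter (fun p => !(solved.contains p.1))).foldl dsrInner PySem.Dict.empty := by
    unfold dsrStepA
    exact dsr_foldl_skip (fun p => solved.contains p.1) dsrInner next_candidates PySem.Dict.empty
  have hB : next_candidates.foldl (dsrStepB solved) PySem.Dict.empty
      = (next_candidates.filter (fun p => !(solved.contains p.1))).foldl
          (fun d p => d.modify p.1 [] (· ++ [p.2])) PySem.Dict.empty := by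
    unfold dsrStepB
    exact dsr_foldl_skip (fun p => solved.contains p.1) _ next_candidates PySem.Dict.empty
  rw [hA, hB]
  set kept := next_candidates.filter (fun p => !(solved.contains p.1)) with hkept
  set dA := kept.foldl dsrInner PySem.Dict.empty with hdA
  set dB := kept.foldl (fun d p => d.modify p.1 [] (· ++ [p.2])) PySem.Dict.empty with hdB
  have hkeysA : dA.keys = PySem.Set.ofList (kept.map (·.1)) := by
    rw [hdA, dsr_keysA, PySem.Dict.keys_empty, PySem.Set.update_nil_left]
  have hkeysB : dB.keys = PySem.Set.ofList (kept.map (·.1)) := by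
    rw [hdB, PySem.Dict.keys_foldl_modify_key, PySem.Dict.keys_empty, PySem.Set.update_nil_left]
  have hndA : dA.keys.Nodup := dsr_nodupA kept _ (by simp [PySem.Dict.keys_empty])
  have hndB : dB.keys.Nodup := by
    rw [hkeysB]; exact PySem.Set.nodup_ofList _
  have hitemsA := PySem.Dict.items_eq_map_keys dA hndA 0
  have hitemsB := PySem.Dict.items_eq_map_keys dB hndB []
  rw [hitemsA, hitemsB, List.map_map, hkeysA, hkeysB]
  refine List.map_congr_left ?_
  intro k hk
  have hgB : dB.getD k [] = (kept.filter (fun p => p.1 == k)).map (·.2) := by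
    rw [hdB, PySem.Dict.getD_foldl_modify_append, PySem.Dict.getD_empty]
    simp
  have hgrp : (kept.filter (fun p => p.1 == k)).map (·.2) ≠ [] := by
    have hkm : k ∈ kept.map (·.1) := (PySem.Set.mem_ofList _ _).mp hk
    rcases List.mem_map.mp hkm with ⟨p, hp, hpk⟩
    have : p ∈ kept.filter (fun p => p.1 == k) := by
      simp [List.mem_filter, hp, hpk]
    simp only [ne_eq, List.map_eq_nil_iff]
    intro hnil
    rw [hnil] at this
    exact absurd this (List.not_mem_nil)
  have hgA : dA.getD k 0 = dsrPyMin ((kept.filter (fun p => p.1 == k)).map (·.2)) := by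
    have h1 : dA.get? k = dsrRun none ((kept.filter (fun p => p.1 == k)).map (·.2)) := by
      rw [hdA, dsr_getA, PySem.Dict.get?_empty]
    rw [dsrRun_eq_pyMin _ hgrp] at h1
    exact PySem.Dict.getD_of_get?_eq_some _ 0 h1
  simp only [Function.comp]
  rw [hgA, hgB]
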